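-- pv_equiv track=rewrite | github.com/balker0322/advent_of_code | 2023_day_14/part2.py | shift_right
-- ===== SOURCE A (Python) =====
-- def shift_right(rocks):
--     rocks = list(list(r) for r in rocks)
--     swap = True
--     while swap:
--         swap=False
--         for r in range(len(rocks)):
--             for c in range(len(rocks[0])-1):
--                 if rocks[r][c]=='O' and rocks[r][c+1]=='.':
--                     rocks[r][c], rocks[r][c+1] = rocks[r][c+1], rocks[r][c]
--                     swap = True
--     return tuple(tuple(r) for r in rocks)
-- ===== SOURCE B (Python) =====
-- def shift_right(rocks):
--     # One right-to-left pass per row: keep the next free slot; an 'O' jumps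
--     # to it, anything that is not '.' or 'O' blocks and resets the slot.
--     grid = [list(r) for r in rocks]
--     cols = len(grid[0]) if grid else 0
--     for row in grid:
--         free = cols - 1
--         for c in range(cols - 1, -1, -1):
--             if row[c] == 'O':
--                 row[c] = '.'
--                 row[free] = 'O'
--                 free -= 1
--             elif row[c] != '.':
--                 free = c - 1
--     return tuple(tuple(r) for r in grid)
-- ===== Notes on version B (the rewrite author's own statement) =====
-- stated objective: alternative
-- what changed: Replaces A's repeated whole-grid bubble sweeps (re-scanning every row until no adjacent swap fires) with a single right-to-left pass per row that keeps a next-free-slot pointer, moving each 'O' straight to it and resetting it at blockers; Pre_ excludes grids with a row shorter than the first row, where B's indexed per-row scan raises IndexError (as does A itself whenever the first row has at least two cells).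
-- outside the precondition, e.g. on shift_right(['O', '']): A returns (('O',), ()), B raises IndexError
import Mathlib
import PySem

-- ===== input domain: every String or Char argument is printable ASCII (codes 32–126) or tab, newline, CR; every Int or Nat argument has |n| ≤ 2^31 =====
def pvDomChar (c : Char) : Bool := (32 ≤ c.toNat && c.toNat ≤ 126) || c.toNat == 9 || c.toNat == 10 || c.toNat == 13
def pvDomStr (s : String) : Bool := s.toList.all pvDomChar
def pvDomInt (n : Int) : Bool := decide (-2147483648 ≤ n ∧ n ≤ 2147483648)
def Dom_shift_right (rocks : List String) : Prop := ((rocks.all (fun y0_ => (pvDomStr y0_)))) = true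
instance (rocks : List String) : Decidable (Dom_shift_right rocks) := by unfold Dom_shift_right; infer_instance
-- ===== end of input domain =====

-- B replaces A's repeated bubble sweeps with one right-to-left free-slot pass per row;
-- proved equal on every input admitted by Pre_.

-- ===== PORT A =====
-- one inner sweep of A's `for c in range(...)` loop over the first-n cells of one row: the same
-- left-to-right adjacent comparisons and in-place swaps (after a swap the moved 'O' is compared
-- next, as in Python)
def pass1 : List Char → List Char × Bool
  | [] => ([], false)
  | [x] => ([x], false)
  | x :: y :: rest =>
    if x = 'O' ∧ y = '.' then
      ('.' :: (pass1 ('O' :: rest)).1, true)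
    else
      let r := pass1 (y :: rest)
      (x :: r.1, r.2)
termination_by l => l.length
decreasing_by all_goals simp

-- termination measure for A's `while swap` loop: for each 'O', the number of cells to its right
def phi : List Char → Nat
  | [] => 0
  | x :: xs => (if x = 'O' then xs.length else 0) + phi xs

def sumPhiN (n : Nat) (g : List (List Char)) : Nat := (g.map (fun r => phi (r.take n))).sum

theorem pass1_swap (rest : List Char) :
    pass1 ('O' :: '.' :: rest) = ('.' :: (pass1 ('O' :: rest)).1, true) := by
  simp [pass1]

theorem pass1_cons₂ (x y : Char) (rest : List Char) (h : ¬(x = 'O' ∧ y = '.')) :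
    pass1 (x :: y :: rest) = (x :: (pass1 (y :: rest)).1, (pass1 (y :: rest)).2) := by
  simp only [pass1, if_neg h]

theorem pass1_length : ∀ l : List Char, (pass1 l).1.length = l.length := by
  intro l
  induction l using pass1.induct with
  | case1 => simp [pass1]
  | case2 x => simp [pass1]
  | case3 x y rest h ih =>
    obtain ⟨hx, hy⟩ := h; subst hx; subst hy
    rw [pass1_swap]
    simp only [List.length_cons]
    rw [ih]
    simp
  | case4 x y rest h ih =>
    rw [pass1_cons₂ x y rest h]
    simp [ih]

theorem phi_pass1_le : ∀ l : List Char, phi (pass1 l).1 ≤ phi l := by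
  intro l
  induction l using pass1.induct with
  | case1 => simp [pass1]
  | case2 x => simp [pass1]
  | case3 x y rest h ih =>
    obtain ⟨hx, hy⟩ := h; subst hx; subst hy
    rw [pass1_swap]
    simp only [phi] at ih ⊢
    simp only [List.length_cons] at *
    simp at ih ⊢
    omega
  | case4 x y rest h ih =>
    rw [pass1_cons₂ x y rest h]
    simp only [phi, pass1_length, List.length_cons]
    exact Nat.add_le_add_left ih _

theorem phi_pass1_lt : ∀ l : List Char, (pass1 l).2 = true → phi (pass1 l).1 < phi l := by
  intro l
  induction l using pass1.induct with
  | case1 => simp [pass1]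
  | case2 x => simp [pass1]
  | case3 x y rest h ih =>
    intro _
    obtain ⟨hx, hy⟩ := h; subst hx; subst hy
    have hle := phi_pass1_le ('O' :: rest)
    rw [pass1_swap]
    simp only [phi, List.length_cons] at hle ⊢
    simp at hle ⊢
    omega
  | case4 x y rest h ih =>
    rw [pass1_cons₂ x y rest h]
    intro hs
    simp only [phi, pass1_length, List.length_cons]
    exact Nat.add_lt_add_left (ih hs) _

-- one sweep of a row: bubble the first n cells, keep the rest (Python only indexes c < n)
def sweepRow (n : Nat) (row : List Char) : List Char × Bool :=
  ((pass1 (row.take n)).1 ++ row.drop n, (pass1 (row.take n)).2)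

def sweepG (n : Nat) (g : List (List Char)) : List (List Char × Bool) := g.map (sweepRow n)

theorem take_sweep (n : Nat) (r : List Char) :
    ((sweepRow n r).1).take n = (pass1 (r.take n)).1 := by
  have h1 : (pass1 (r.take n)).1.length = (r.take n).length := pass1_length _
  show ((pass1 (r.take n)).1 ++ r.drop n).take n = _
  rw [List.take_append, List.take_of_length_le (by rw [h1, List.length_take]; omega)]
  rw [h1, List.length_take]
  by_cases hr : n ≤ r.length
  · have h0 : n - min n r.length = 0 := by omega
    rw [h0]
    simp
  · have h0 : r.drop n = [] := by
      rw [List.drop_eq_nil_iff]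
      omega
    simp [h0]

theorem sumPhiN_le (n : Nat) (g : List (List Char)) :
    sumPhiN n ((sweepG n g).map (fun p => p.1)) ≤ sumPhiN n g := by
  induction g with
  | nil => simp [sumPhiN, sweepG]
  | cons r g ih =>
    simp only [sumPhiN, sweepG, List.map_cons, List.sum_cons] at *
    have h1 : phi (((sweepRow n r).1).take n) ≤ phi (r.take n) := by
      rw [take_sweep]
      exact phi_pass1_le _
    omega

theorem sumPhiN_lt (n : Nat) (g : List (List Char))
    (h : (sweepG n g).any (fun p => p.2) = true) :
    sumPhiN n ((sweepG n g).map (fun p => p.1)) < sumPhiN n g := by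
  induction g with
  | nil => simp [sweepG] at h
  | cons r g ih =>
    simp only [sweepG, List.map_cons, List.any_cons, Bool.or_eq_true] at h
    simp only [sumPhiN, sweepG, List.map_cons, List.sum_cons]
    rcases h with h | h
    · have h1 : phi (((sweepRow n r).1).take n) < phi (r.take n) := by
        rw [take_sweep]
        exact phi_pass1_lt _ h
      have h2 := sumPhiN_le n g
      simp only [sumPhiN, sweepG] at h2
      omega
    · have h1 : phi (((sweepRow n r).1).take n) ≤ phi (r.take n) := by
        rw [take_sweep]
        exact phi_pass1_le _
      have h2 := ih h
      simp only [sumPhiN, sweepG] at h2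
      omega

-- A's `while swap` loop: sweep every row; repeat while some sweep swapped
def loopA (n : Nat) (g : List (List Char)) : List (List Char) :=
  if (sweepG n g).any (fun p => p.2) then loopA n ((sweepG n g).map (fun p => p.1))
  else (sweepG n g).map (fun p => p.1)
termination_by sumPhiN n g
decreasing_by
  rename_i h
  exact sumPhiN_lt n g h

def shift_right (rocks : List String) : List (List String) :=
  (loopA ((rocks.headD "").toList.length) (rocks.map (fun s => s.toList))).map
    (fun row => row.map (fun c => String.ofList [c]))

-- ===== PORT B =====
-- Source B's inner `for c in range(cols-1, -1, -1)` loop on one row: fuel c+1 processes index c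
-- (the list is the mutable Python row; row[c] is in range on every Pre_-admitted input, so
-- getD/set are exact there)
def bGo : List Char → Int → Nat → List Char
  | row, _, 0 => row
  | row, free, c + 1 =>
    if row.getD c ' ' = 'O' then bGo ((row.set c '.').set free.toNat 'O') (free - 1) c
    else if row.getD c ' ' = '.' then bGo row free c
    else bGo row ((c : Int) - 1) c

def shift_right_alt (rocks : List String) : List (List String) :=
  rocks.map (fun s =>
    (bGo s.toList (((rocks.headD "").toList.length : Int) - 1)
        ((rocks.headD "").toList.length)).map (fun c => String.ofList [c]))

-- ===== PRECONDITION & SPEC =====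
-- Pre_ excludes grids with a row shorter than the first row: B's indexed per-row scan raises
-- IndexError there, as does A itself whenever the first row has at least two cells.
def Pre_shift_right (rocks : List String) : Prop :=
  ∀ r ∈ rocks, (rocks.headD "").toList.length ≤ r.toList.length
instance (rocks : List String) : Decidable (Pre_shift_right rocks) := by
  unfold Pre_shift_right; infer_instance
def pvWitness_shift_right : List String := ["O.#.O.", ".Ox.OO"]
def Spec_shift_right (rocks : List String) (out : List (List String)) : Prop := out = shift_right_alt rocks
instance (rocks : List String) (out : List (List String)) : Decidable (Spec_shift_right rocks out) := by unfold Spec_shift_right; infer_instance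

-- ===== CLAIM (what is proved, stated in full; the proofs are below) =====
def Claim_equal_shift_right : Prop := ∀ (rocks : List String), Dom_shift_right rocks → Pre_shift_right rocks → Spec_shift_right rocks (shift_right rocks)

-- ===== LEMMAS AND PROOFS =====

-- the packed form of a row prefix: per wall-free stretch, its dots then its 'O's
def goB : List Char → Nat → Nat → List Char → List Char
  | [], d, o, acc => acc ++ List.replicate d '.' ++ List.replicate o 'O'
  | ch :: rest, d, o, acc =>
    if ch = 'O' then goB rest d (o + 1) acc
    else if ch = '.' then goB rest (d + 1) o acc
    else goB rest 0 0 (acc ++ List.replicate d '.' ++ List.replicate o 'O' ++ [ch])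

def rowB (l : List Char) : List Char := goB l 0 0 []

theorem drop_sweep (n : Nat) (r : List Char) :
    ((sweepRow n r).1).drop n = r.drop n := by
  have h1 : (pass1 (r.take n)).1.length = (r.take n).length := pass1_length _
  show ((pass1 (r.take n)).1 ++ r.drop n).drop n = _
  rw [List.drop_append, List.drop_eq_nil_iff.2 (by rw [h1, List.length_take]; omega)]
  rw [h1, List.length_take]
  by_cases hr : n ≤ r.length
  · have h0 : n - min n r.length = 0 := by omega
    rw [h0]
    simp
  · have h0 : r.drop n = [] := by
      rw [List.drop_eq_nil_iff]
      omega
    simp [h0]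

theorem goB_nil (d o : Nat) (acc : List Char) :
    goB [] d o acc = acc ++ List.replicate d '.' ++ List.replicate o 'O' := rfl

theorem goB_O (rest : List Char) (d o : Nat) (acc : List Char) :
    goB ('O' :: rest) d o acc = goB rest d (o + 1) acc := by
  simp [goB]

theorem goB_dot (rest : List Char) (d o : Nat) (acc : List Char) :
    goB ('.' :: rest) d o acc = goB rest (d + 1) o acc := by
  simp [goB]

theorem goB_wall (ch : Char) (rest : List Char) (d o : Nat) (acc : List Char)
    (h1 : ¬ch = 'O') (h2 : ¬ch = '.') :
    goB (ch :: rest) d o acc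
      = goB rest 0 0 (acc ++ List.replicate d '.' ++ List.replicate o 'O' ++ [ch]) := by
  simp [goB, h1, h2]

-- a sweep that reports no swap left the row unchanged
theorem pass1_noswap : ∀ l : List Char, (pass1 l).2 = false → (pass1 l).1 = l := by
  intro l
  induction l using pass1.induct with
  | case1 => simp [pass1]
  | case2 x => simp [pass1]
  | case3 x y rest h ih =>
    obtain ⟨hx, hy⟩ := h; subst hx; subst hy
    rw [pass1_swap]
    simp
  | case4 x y rest h ih =>
    rw [pass1_cons₂ x y rest h]
    intro hs
    simp [ih hs]

-- one bubble sweep does not change the packed form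
theorem goB_pass1 : ∀ (l : List Char) (d o : Nat) (acc : List Char),
    goB (pass1 l).1 d o acc = goB l d o acc := by
  intro l
  induction l using pass1.induct with
  | case1 => intro d o acc; simp [pass1]
  | case2 x => intro d o acc; simp [pass1]
  | case3 x y rest h ih =>
    intro d o acc
    obtain ⟨hx, hy⟩ := h; subst hx; subst hy
    rw [pass1_swap]
    simp only [goB_dot, goB_O, ih]
  | case4 x y rest h ih =>
    intro d o acc
    rw [pass1_cons₂ x y rest h]
    by_cases hO : x = 'O'
    · subst hO
      simp only [goB_O, ih]
    · by_cases hD : x = '.'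
      · subst hD
        simp only [goB_dot, ih]
      · rw [goB_wall x _ _ _ _ hO hD, goB_wall x _ _ _ _ hO hD, ih]

-- on a stable row (no swap fires) the packed form is the identity
theorem goB_stable : ∀ l : List Char, (pass1 l).2 = false →
    ∀ (d o : Nat) (acc : List Char), (o ≠ 0 → l.head? ≠ some '.') →
    goB l d o acc = acc ++ List.replicate d '.' ++ List.replicate o 'O' ++ l := by
  intro l
  induction l using pass1.induct with
  | case1 => intro _ d o acc _; simp [goB]
  | case2 x =>
    intro _ d o acc hh
    by_cases hO : x = 'O'
    · subst hO
      rw [goB_O, goB_nil, List.replicate_succ' (n := o)]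
      simp
    · by_cases hD : x = '.'
      · subst hD
        have ho : o = 0 := by
          by_contra hne
          exact (hh hne) (by simp)
        subst ho
        rw [goB_dot, goB_nil, List.replicate_succ' (n := d)]
        simp
      · rw [goB_wall x _ _ _ _ hO hD, goB_nil]
        simp
  | case3 x y rest h ih =>
    intro hs
    obtain ⟨hx, hy⟩ := h; subst hx; subst hy
    rw [pass1_swap] at hs
    simp at hs
  | case4 x y rest h ih =>
    intro hs d o acc hh
    rw [pass1_cons₂ x y rest h] at hs
    simp only at hs
    by_cases hO : x = 'O'
    · subst hO
      have hy : ¬ y = '.' := fun hy => h ⟨rfl, hy⟩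
      rw [goB_O, ih hs d (o + 1) acc (fun _ => by simpa using hy),
        List.replicate_succ' (n := o)]
      simp
    · by_cases hD : x = '.'
      · subst hD
        have ho : o = 0 := by
          by_contra hne
          exact (hh hne) (by simp)
        subst ho
        rw [goB_dot, ih hs (d + 1) 0 acc (by simp), List.replicate_succ' (n := d)]
        simp
      · rw [goB_wall x _ _ _ _ hO hD, ih hs 0 0 _ (by simp)]
        simp

theorem rowB_pass1 (l : List Char) : rowB (pass1 l).1 = rowB l := by
  simp [rowB, goB_pass1]

theorem rowB_stable (l : List Char) (h : (pass1 l).2 = false) : rowB l = l := by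
  have := goB_stable l h 0 0 [] (by simp)
  simpa [rowB] using this

-- A's whole loop computes the per-row packed form of the first n cells
theorem loopA_eq (n : Nat) (g : List (List Char)) :
    loopA n g = g.map (fun r => rowB (r.take n) ++ r.drop n) := by
  induction g using loopA.induct (n := n) with
  | case1 g h ih =>
    rw [loopA, if_pos h]
    rw [ih]
    simp only [sweepG, List.map_map]
    apply List.map_congr_left
    intro r _
    show rowB (((sweepRow n r).1).take n) ++ ((sweepRow n r).1).drop n = _
    rw [take_sweep, drop_sweep, rowB_pass1]
  | case2 g h =>
    rw [loopA, if_neg h]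
    have hall : ∀ r ∈ g, (pass1 (r.take n)).2 = false := by
      intro r hr
      by_contra hc
      apply h
      rw [List.any_eq_true]
      exact ⟨sweepRow n r, List.mem_map_of_mem hr, by simpa [sweepRow] using hc⟩
    simp only [sweepG, List.map_map]
    apply List.map_congr_left
    intro r hr
    show (sweepRow n r).1 = rowB (r.take n) ++ r.drop n
    show (pass1 (r.take n)).1 ++ r.drop n = _
    rw [pass1_noswap _ (hall r hr), rowB_stable _ (hall r hr)]

-- ==== B-side lemmas: the free-slot scan also computes the packed form ====

theorem goB_rep (m : Nat) : ∀ (d o : Nat) (acc : List Char),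
    goB (List.replicate m '.') d o acc
      = acc ++ List.replicate (d + m) '.' ++ List.replicate o 'O' := by
  induction m with
  | zero => intro d o acc; simp [goB_nil]
  | succ m ih =>
    intro d o acc
    rw [List.replicate_succ, goB_dot, ih]
    have h : d + 1 + m = d + (m + 1) := by omega
    rw [h]

theorem goB_L1 (m : Nat) : ∀ (u : List Char) (d o : Nat) (acc : List Char),
    goB (u ++ 'O' :: List.replicate m '.') d o acc
      = goB (u ++ List.replicate m '.') d o acc ++ ['O'] := by
  intro u
  induction u with
  | nil =>
    intro d o acc
    simp only [List.nil_append, goB_O, goB_rep, List.replicate_succ' (n := o)]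
    simp [List.append_assoc]
  | cons x u ih =>
    intro d o acc
    by_cases hO : x = 'O'
    · subst hO
      simp only [List.cons_append, goB_O, ih]
    · by_cases hD : x = '.'
      · subst hD
        simp only [List.cons_append, goB_dot, ih]
      · simp only [List.cons_append, goB_wall x _ _ _ _ hO hD, ih]

theorem goB_L2 (w : Char) (hw1 : ¬w = 'O') (hw2 : ¬w = '.') (m : Nat) :
    ∀ (u : List Char) (d o : Nat) (acc : List Char),
    goB (u ++ w :: List.replicate m '.') d o acc
      = goB u d o acc ++ w :: List.replicate m '.' := by
  intro u
  induction u with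
  | nil =>
    intro d o acc
    simp only [List.nil_append, goB_wall w _ _ _ _ hw1 hw2, goB_rep, goB_nil]
    simp [List.append_assoc]
  | cons x u ih =>
    intro d o acc
    by_cases hO : x = 'O'
    · subst hO
      simp only [List.cons_append, goB_O, ih]
    · by_cases hD : x = '.'
      · subst hD
        simp only [List.cons_append, goB_dot, ih]
      · simp only [List.cons_append, goB_wall x _ _ _ _ hO hD, ih]

theorem rowB_rep (m : Nat) : rowB (List.replicate m '.') = List.replicate m '.' := by
  simp [rowB, goB_rep]

-- a stretch of cells reading '.' is a replicate
theorem rep_seg : ∀ (m c : Nat) (l : List Char), c + m ≤ l.length →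
    (∀ i : Nat, c ≤ i → i < c + m → l.getD i ' ' = '.') →
    (l.drop c).take m = List.replicate m '.' := by
  intro m
  induction m with
  | zero => intro c l _ _; simp
  | succ m ih =>
    intro c l hlen hdots
    have hc : c < l.length := by omega
    rw [← List.getElem_cons_drop hc, List.take_succ_cons, List.replicate_succ]
    have h1 : l[c] = '.' := by
      have := hdots c (le_refl c) (by omega)
      rwa [List.getD_eq_getElem l ' ' hc] at this
    rw [h1]
    have h2 := ih (c + 1) l (by omega) (by
      intro i hi1 hi2
      exact hdots i (by omega) (by omega))
    exact congrArg _ h2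

theorem take_decomp (l : List Char) (c k : Nat) (hck : c ≤ k) (hk : k < l.length)
    (hdots : ∀ i : Nat, c < i → i ≤ k → l.getD i ' ' = '.') :
    l.take (k + 1) = l.take c ++ l.getD c ' ' :: List.replicate (k - c) '.' := by
  have hc : c < l.length := by omega
  have h0 : k + 1 = c + (k - c + 1) := by omega
  rw [h0, List.take_add]
  congr 1
  rw [← List.getElem_cons_drop hc, List.take_succ_cons,
    List.getD_eq_getElem l ' ' hc]
  congr 1
  exact rep_seg (k - c) (c + 1) l (by omega) (by
    intro i hi1 hi2
    exact hdots i (by omega) (by omega))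

theorem drop_decomp (l : List Char) (c k : Nat) (hck : c ≤ k) (hk : k < l.length)
    (hdots : ∀ i : Nat, c < i → i ≤ k → l.getD i ' ' = '.') :
    l.drop c = l.getD c ' ' :: List.replicate (k - c) '.' ++ l.drop (k + 1) := by
  have hc : c < l.length := by omega
  conv_lhs => rw [← List.take_append_drop (k - c + 1) (l.drop c)]
  rw [List.drop_drop]
  have h1 : c + (k - c + 1) = k + 1 := by omega
  rw [h1]
  congr 1
  rw [← List.getElem_cons_drop hc, List.take_succ_cons,
    List.getD_eq_getElem l ' ' hc]
  congr 1
  exact rep_seg (k - c) (c + 1) l (by omega) (by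
    intro i hi1 hi2
    exact hdots i (by omega) (by omega))

theorem set_take_decomp (l : List Char) (c k : Nat) (hck : c ≤ k) (hk : k ≤ l.length)
    (_hc : c < l.length)
    (hdots : ∀ i : Nat, c < i → i ≤ k → l.getD i ' ' = '.') :
    (l.set c '.').take k = l.take c ++ List.replicate (k - c) '.' := by
  have h0 : k = c + (k - c) := by omega
  conv_lhs => rw [h0, List.take_add]
  congr 1
  · rw [List.take_set]
    exact List.set_eq_of_length_le (by rw [List.length_take]; exact min_le_left _ _)
  · apply rep_seg (k - c) c (l.set c '.') (by simp only [List.length_set]; omega)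
    intro i hi1 hi2
    have hil : i < l.length := by omega
    rw [List.getD_eq_getElem _ ' ' (by simp; omega)]
    by_cases hie : c = i
    · subst hie
      exact List.getElem_set_self _
    · rw [List.getElem_set_ne hie _]
      have := hdots i (by omega) (by omega)
      rwa [List.getD_eq_getElem l ' ' hil] at this

theorem bGo_succ (row : List Char) (free : Int) (c : Nat) :
    bGo row free (c + 1)
      = if row.getD c ' ' = 'O' then bGo ((row.set c '.').set free.toNat 'O') (free - 1) c
        else if row.getD c ' ' = '.' then bGo row free c
        else bGo row ((c : Int) - 1) c := rfl

-- main invariant of B's scan: with the cells at indices c..f all '.', finishing the scan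
-- packs the first f+1 cells and leaves the rest untouched
theorem bGo_spec : ∀ (c : Nat) (l : List Char) (f : Int),
    (c : Int) ≤ f + 1 → f < (l.length : Int) →
    (∀ i : Nat, c ≤ i → (i : Int) ≤ f → l.getD i ' ' = '.') →
    bGo l f c = rowB (l.take (f + 1).toNat) ++ l.drop (f + 1).toNat := by
  intro c
  induction c with
  | zero =>
    intro l f h1 h2 hdots
    show l = _
    have hk : (f + 1).toNat ≤ l.length := by omega
    have hrep : l.take (f + 1).toNat = List.replicate (f + 1).toNat '.' := by
      have := rep_seg (f + 1).toNat 0 l (by omega) (by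
        intro i hi1 hi2
        exact hdots i (by omega) (by omega))
      simpa using this
    rw [hrep, rowB_rep, ← hrep, List.take_append_drop]
  | succ c ih =>
    intro l f h1 h2 hdots
    have hcf : (c : Int) ≤ f := by omega
    have hf0 : 0 ≤ f := by omega
    have hkdef : ((f.toNat : Int)) = f := by omega
    have hck : c ≤ f.toNat := by omega
    have hklen : f.toNat < l.length := by omega
    have hfk : (f + 1).toNat = f.toNat + 1 := by omega
    rw [bGo_succ, hfk]
    have hdots' : ∀ i : Nat, c < i → i ≤ f.toNat → l.getD i ' ' = '.' := by
      intro i hi1 hi2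
      exact hdots i (by omega) (by omega)
    by_cases hO : l.getD c ' ' = 'O'
    · rw [if_pos hO]
      have hrec := ih ((l.set c '.').set f.toNat 'O') (f - 1)
        (by omega) (by simp; omega) (by
          intro i hi1 hi2
          have hil : i < l.length := by omega
          rw [List.getD_eq_getElem _ ' ' (by simp; omega)]
          rw [List.getElem_set_ne (by omega) _]
          by_cases hie : c = i
          · subst hie
            exact List.getElem_set_self _
          · rw [List.getElem_set_ne hie _]
            have := hdots i (by omega) (by omega)
            rwa [List.getD_eq_getElem l ' ' hil] at this)
      have hm1 : (f - 1 + 1).toNat = f.toNat := by omega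
      rw [hm1] at hrec
      rw [hrec]
      -- the updated row's first f.toNat cells and its tail
      have htake : ((l.set c '.').set f.toNat 'O').take f.toNat
          = l.take c ++ List.replicate (f.toNat - c) '.' := by
        rw [List.take_set,
          List.set_eq_of_length_le (by rw [List.length_take]; exact min_le_left _ _)]
        exact set_take_decomp l c f.toNat hck (by omega) (by omega) hdots'
      have hset_len : f.toNat < ((l.set c '.').set f.toNat 'O').length := by simp; omega
      have hdrop : ((l.set c '.').set f.toNat 'O').drop f.toNat
          = 'O' :: l.drop (f.toNat + 1) := by
        rw [← List.getElem_cons_drop hset_len]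
        rw [List.drop_set_of_lt (by omega), List.drop_set_of_lt (by omega)]
        congr 1
        exact List.getElem_set_self _
      rw [htake, hdrop]
      have htk := take_decomp l c f.toNat hck hklen hdots'
      rw [hO] at htk
      rw [htk]
      show (rowB (l.take c ++ List.replicate (f.toNat - c) '.')) ++ 'O' :: l.drop (f.toNat + 1)
          = rowB (l.take c ++ 'O' :: List.replicate (f.toNat - c) '.') ++ l.drop (f.toNat + 1)
      rw [show rowB (l.take c ++ 'O' :: List.replicate (f.toNat - c) '.')
            = rowB (l.take c ++ List.replicate (f.toNat - c) '.') ++ ['O'] from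
          goB_L1 (f.toNat - c) (l.take c) 0 0 []]
      simp
    · rw [if_neg hO]
      by_cases hD : l.getD c ' ' = '.'
      · rw [if_pos hD]
        have hrec := ih l f (by omega) h2 (by
          intro i hi1 hi2
          by_cases hie : i = c
          · subst hie; exact hD
          · exact hdots i (by omega) (by omega))
        rw [hfk] at hrec
        exact hrec
      · rw [if_neg hD]
        have hrec := ih l ((c : Int) - 1) (by omega) (by omega) (by
          intro i hi1 hi2
          omega)
        have hm1 : ((c : Int) - 1 + 1).toNat = c := by omega
        rw [hm1] at hrec
        rw [hrec]
        have htk := take_decomp l c f.toNat hck hklen hdots'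
        have hdp := drop_decomp l c f.toNat hck hklen hdots'
        rw [htk, hdp]
        rw [show rowB (l.take c ++ l.getD c ' ' :: List.replicate (f.toNat - c) '.')
              = rowB (l.take c) ++ l.getD c ' ' :: List.replicate (f.toNat - c) '.' from
            goB_L2 (l.getD c ' ') hO hD (f.toNat - c) (l.take c) 0 0 []]
        simp

-- ===== VERDICT (by name: the statement is the Claim_ definition above) =====
theorem shift_right_spec : Claim_equal_shift_right := by
  intro rocks _ hpre
  show shift_right rocks = shift_right_alt rocks
  unfold shift_right shift_right_alt
  rw [loopA_eq, List.map_map, List.map_map]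
  apply List.map_congr_left
  intro s hs
  have hlen := hpre s hs
  have hb := bGo_spec ((rocks.headD "").toList.length) s.toList
      (((rocks.headD "").toList.length : Int) - 1)
      (by omega) (by omega)
      (by intro i h1 h2; omega)
  have ht : ((((rocks.headD "").toList.length : Int) - 1) + 1).toNat
      = (rocks.headD "").toList.length := by omega
  rw [ht] at hb
  simp only [Function.comp]
  rw [hb]
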